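-- pv_equiv track=rewrite | github.com/mamikula/Algorithms-and-Data-Structures | zadania rozne/ASD cw7.py | tankb1
-- ===== SOURCE A (Python) =====
-- def tankb1(S, P, L, t):
--     n = len(S) + 2
--     stations = [[None, None] for _ in range(n)]
--     stations[0][0], stations[0][1] = 0, 0
--
--     for i in range(1, n - 1):
--         stations[i][0], stations[i][1] = S[i - 1], P[i - 1]
--     stations[n - 1][0], stations[n - 1][1] = t, 0
--
--     fuel = 0
--     cost = 0
--     for i in range(n - 1):
--         if i > 0:
--             fuel -= (stations[i][0] - stations[i - 1][0])
--         min_cost = stations[i][1]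
--         st = i
--         for j in range(i, n):
--             if stations[j][0] > stations[i][0] + L:
--                 break
--             else:
--                 if stations[j][1] < min_cost:
--                     min_cost, st = stations[j][1], j
--                     break
--         if st == i:
--             cost += min(L - fuel, (t - stations[i][0]) - fuel) * stations[i][1]
--             fuel = L
--         else:
--             cost += max(((stations[st][0] - stations[i][0]) - fuel) * stations[i][1], 0)
--             fuel = max(fuel, stations[st][0] - stations[i][0])
--
--     return cost
-- ===== SOURCE B (Python) =====
-- def tankb1(S, P, L, t):
--     pos = [0] + list(S) + [t]
--     price = [0] + list(P[:len(S)]) + [0]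
--     n = len(pos)
--     nxt = [n] * n     # index of the next station strictly cheaper than station i
--     far = pos[:]      # far[i]: farthest point passed on the way up to (excluding) station nxt[i]
--     stack = []
--     for i in range(n - 1, -1, -1):
--         while stack and price[stack[-1]] >= price[i]:
--             far[i] = max(far[i], far[stack.pop()])
--         if stack:
--             nxt[i] = stack[-1]
--         stack.append(i)
--     fuel = 0
--     cost = 0
--     for i in range(n - 1):
--         if i > 0:
--             fuel -= pos[i] - pos[i - 1]
--         j = nxt[i]
--         if j < n and max(far[i], pos[j]) <= pos[i] + L:
--             d = pos[j] - pos[i]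
--             cost += max((d - fuel) * price[i], 0)
--             fuel = max(fuel, d)
--         else:
--             cost += min(L - fuel, (t - pos[i]) - fuel) * price[i]
--             fuel = L
--     return cost
-- ===== Notes on version B (the rewrite author's own statement) =====
-- stated objective: faster
-- what changed: A rescans the stations to the right of every station (with an early break) to find the first cheaper one in reach; B builds next-cheaper-station indices and the farthest point on the way to them in one backward monotonic-stack pass, then makes one O(1) decision per station; Pre_ only excludes len(P) < len(S), where A raises IndexError.
import Mathlib
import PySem

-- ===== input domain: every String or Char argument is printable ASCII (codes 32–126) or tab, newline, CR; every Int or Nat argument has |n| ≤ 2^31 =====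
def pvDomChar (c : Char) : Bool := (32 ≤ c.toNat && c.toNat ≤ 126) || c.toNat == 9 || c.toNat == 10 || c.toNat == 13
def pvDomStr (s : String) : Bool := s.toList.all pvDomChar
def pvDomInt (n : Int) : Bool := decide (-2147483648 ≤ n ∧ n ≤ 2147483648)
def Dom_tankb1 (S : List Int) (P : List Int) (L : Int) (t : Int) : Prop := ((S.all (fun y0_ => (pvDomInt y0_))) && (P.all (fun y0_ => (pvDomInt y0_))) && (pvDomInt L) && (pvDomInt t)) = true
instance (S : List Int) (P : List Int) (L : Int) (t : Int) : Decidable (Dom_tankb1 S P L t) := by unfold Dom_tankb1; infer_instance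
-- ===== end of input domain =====

-- B replaces A's per-station rightward rescan by one backward monotonic-stack pass that records, for
-- every station, the next strictly cheaper station and the farthest point on the way to it, so the
-- main pass decides each station in O(1) (faster: linear passes instead of A's nested rescan).

-- ===== PORT A =====
-- the inner loop 'for j in range(i, n): …' of A; min_cost never changes before the loop exits,
-- so it is the constant ci here.
def scanA : List (Int × Int) → Nat → Int → Int → Int → Nat → Nat
  | [], _, _, _, _, i => i
  | (p, c) :: tl, j, pi, ci, L, i =>
    if p > pi + L then i
    else if c < ci then j
    else scanA tl (j + 1) pi ci L i

-- stations = [[0,0]] + pairs(S,P) + [[t,0]]: the fill loop reads S[i-1], P[i-1] for i-1 < len(S),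
-- i.e. exactly S.zip P under Pre_ (len(S) ≤ len(P)); all list indexing is in range, so getD is exact.
def tankb1 (S : List Int) (P : List Int) (L : Int) (t : Int) : Int :=
  let sts : List (Int × Int) := (0, 0) :: (S.zip P ++ [(t, 0)])
  let n := S.length + 2
  ((List.range (n - 1)).foldl (fun fc i =>
    let fuel := if 0 < i then fc.1 - ((sts.getD i (0,0)).1 - (sts.getD (i-1) (0,0)).1) else fc.1
    let pi := (sts.getD i (0,0)).1
    let ci := (sts.getD i (0,0)).2
    let st := scanA (sts.drop i) i pi ci L i
    if st = i then (L, fc.2 + min (L - fuel) ((t - pi) - fuel) * ci)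
    else (max fuel ((sts.getD st (0,0)).1 - pi),
          fc.2 + max (((sts.getD st (0,0)).1 - pi - fuel) * ci) 0)) (0, 0)).2

-- ===== PORT B =====
-- the 'while stack and price[stack[-1]] >= price[i]' loop of Source B; the stack is a list with its top
-- first, so the loop is structural recursion on it.
def popB (price far : List Int) (ci : Int) : List Nat → Int → List Nat × Int
  | [], f => ([], f)
  | s :: tl, f =>
    if ci ≤ price.getD s 0 then popB price far ci tl (max f (far.getD s 0))
    else (s :: tl, f)

-- the 'for i in range(n - 1, -1, -1)' pass of Source B: counter c + 1 processes index i = c.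
def buildB (price : List Int) : Nat → List Nat → List Int → List Nat → List Nat × List Int
  | 0, nxt, far, _ => (nxt, far)
  | c + 1, nxt, far, stk =>
    let pf := popB price far (price.getD c 0) stk (far.getD c 0)
    let nxt' := match pf.1 with
      | [] => nxt
      | s :: _ => nxt.set c s
    buildB price c nxt' (far.set c pf.2) (c :: pf.1)

def tankb1_alt (S : List Int) (P : List Int) (L : Int) (t : Int) : Int :=
  let pos : List Int := 0 :: S ++ [t]
  let price : List Int := 0 :: P.take S.length ++ [0]
  let n := pos.length
  let nm := buildB price n (List.replicate n n) pos []
  ((List.range (n - 1)).foldl (fun fc i =>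
    let fuel := if 0 < i then fc.1 - (pos.getD i 0 - pos.getD (i-1) 0) else fc.1
    let j := nm.1.getD i 0
    if j < n ∧ max (nm.2.getD i 0) (pos.getD j 0) ≤ pos.getD i 0 + L then
      let d := pos.getD j 0 - pos.getD i 0
      (max fuel d, fc.2 + max ((d - fuel) * price.getD i 0) 0)
    else (L, fc.2 + min (L - fuel) ((t - pos.getD i 0) - fuel) * price.getD i 0)) (0, 0)).2

-- ===== PRECONDITION & SPEC =====
-- A reads P[i] for every i < len(S): with len(P) < len(S) it raises IndexError; Pre_ excludes exactly that.
def Pre_tankb1 (S : List Int) (P : List Int) (L : Int) (t : Int) : Prop := S.length ≤ P.length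
instance (S : List Int) (P : List Int) (L : Int) (t : Int) : Decidable (Pre_tankb1 S P L t) := by unfold Pre_tankb1; infer_instance
def pvWitness_tankb1 : List Int × List Int × Int × Int := ([3], [2], 5, 10)

def Spec_tankb1 (S : List Int) (P : List Int) (L : Int) (t : Int) (out : Int) : Prop := out = tankb1_alt S P L t
instance (S : List Int) (P : List Int) (L : Int) (t : Int) (out : Int) : Decidable (Spec_tankb1 S P L t out) := by unfold Spec_tankb1; infer_instance

-- ===== CLAIM (what is proved, stated in full; the proofs are below) =====
def Claim_equal_tankb1 : Prop := ∀ (S : List Int) (P : List Int) (L : Int) (t : Int), Dom_tankb1 S P L t → Pre_tankb1 S P L t → Spec_tankb1 S P L t (tankb1 S P L t)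

-- ===== LEMMAS AND PROOFS =====

-- Nsp price i: the first index j > i with price[j] < price[i] (price.length if none).
def Nsp (price : List Int) (i : Nat) : Nat :=
  match (price.drop (i+1)).findIdx? (fun c => decide (c < price.getD i 0)) with
  | some k => i + 1 + k
  | none => price.length

lemma getD_drop' (l : List Int) (i j : Nat) (d : Int) : (l.drop i).getD j d = l.getD (i+j) d := by
  simp [List.getD_eq_getElem?_getD, List.getElem?_drop]

lemma Nsp_gt (price : List Int) (i : Nat) (h : i < price.length) : i < Nsp price i := by
  cases hf : (price.drop (i+1)).findIdx? (fun c => decide (c < price.getD i 0)) with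
  | none => simp only [Nsp, hf]; omega
  | some k => simp only [Nsp, hf]; omega

lemma Nsp_le (price : List Int) (i : Nat) : Nsp price i ≤ price.length := by
  cases hf : (price.drop (i+1)).findIdx? (fun c => decide (c < price.getD i 0)) with
  | none => simp only [Nsp, hf]; omega
  | some k =>
    have := (List.findIdx?_eq_some_iff_getElem.mp hf).1
    simp only [List.length_drop] at this
    simp only [Nsp, hf]; omega

lemma Nsp_cheap (price : List Int) (i : Nat) (h : Nsp price i < price.length) :
    price.getD (Nsp price i) 0 < price.getD i 0 := by
  cases hf : (price.drop (i+1)).findIdx? (fun c => decide (c < price.getD i 0)) with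
  | none => simp only [Nsp, hf] at h; omega
  | some k =>
    obtain ⟨hk, hp, -⟩ := List.findIdx?_eq_some_iff_getElem.mp hf
    simp only [Nsp, hf] at h ⊢
    rw [← List.getD_eq_getElem (price.drop (i+1)) 0 hk, getD_drop'] at hp
    simpa using hp

lemma Nsp_not_cheap (price : List Int) (i k : Nat) (h1 : i < k) (h2 : k < Nsp price i) :
    ¬ (price.getD k 0 < price.getD i 0) := by
  have hle := Nsp_le price i
  have hr : k - (i+1) < (price.drop (i+1)).length := by simp; omega
  have hval : price.getD k 0 = (price.drop (i+1)).getD (k - (i+1)) 0 := by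
    rw [getD_drop']; congr 1; omega
  cases hf : (price.drop (i+1)).findIdx? (fun c => decide (c < price.getD i 0)) with
  | none =>
    have hall := List.findIdx?_eq_none_iff.mp hf
    have hmem : (price.drop (i+1)).getD (k - (i+1)) 0 ∈ price.drop (i+1) := by
      rw [List.getD_eq_getElem _ _ hr]; exact List.getElem_mem hr
    have := hall _ hmem
    rw [hval]; simpa using this
  | some k0 =>
    obtain ⟨hk, -, hmin⟩ := List.findIdx?_eq_some_iff_getElem.mp hf
    simp only [Nsp, hf] at h2
    have := hmin (k - (i+1)) (by omega)
    rw [← List.getD_eq_getElem (price.drop (i+1)) 0 hr] at this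
    rw [hval]; simpa using this

lemma Nsp_eq (price : List Int) (i j : Nat) (hij : i < j) (hle : j ≤ price.length)
    (hmin : ∀ k, i < k → k < j → ¬ (price.getD k 0 < price.getD i 0))
    (hch : j < price.length → price.getD j 0 < price.getD i 0) :
    Nsp price i = j := by
  rcases lt_or_ge j price.length with hlt | hge
  · have hsome : (price.drop (i+1)).findIdx? (fun c => decide (c < price.getD i 0)) = some (j - (i+1)) := by
      rw [List.findIdx?_eq_some_iff_getElem]
      have hjr : j - (i+1) < (price.drop (i+1)).length := by simp; omega
      refine ⟨hjr, ?_, ?_⟩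
      · rw [← List.getD_eq_getElem (price.drop (i+1)) 0 hjr, getD_drop',
            show i + 1 + (j - (i+1)) = j by omega]
        simpa using hch hlt
      · intro j' hj'
        have hr' : j' < (price.drop (i+1)).length := by omega
        rw [← List.getD_eq_getElem (price.drop (i+1)) 0 hr', getD_drop']
        simpa using hmin (i+1+j') (by omega) (by simp at hjr; omega)
    simp only [Nsp, hsome]; omega
  · have hj : j = price.length := by omega
    subst hj
    have hnone : (price.drop (i+1)).findIdx? (fun c => decide (c < price.getD i 0)) = none := by
      rw [List.findIdx?_eq_none_iff]
      intro x hx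
      obtain ⟨r, hr, hxe⟩ := List.mem_iff_getElem.mp hx
      rw [← List.getD_eq_getElem (price.drop (i+1)) 0 hr, getD_drop'] at hxe
      subst hxe
      simpa using hmin (i+1+r) (by omega) (by simp at hr; omega)
    simp only [Nsp, hnone]

-- Fsp pos price i: the maximum of pos over the indices i … Nsp price i - 1.
def Fsp (pos price : List Int) (i : Nat) : Int :=
  ((pos.drop (i+1)).take (Nsp price i - (i+1))).foldl max (pos.getD i 0)

-- Msp pos price i: the maximum of pos over the indices i+1 … Nsp price i (used on A's side).
def Msp (pos price : List Int) (i : Nat) : Int :=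
  ((pos.drop (i+2)).take (Nsp price i - (i+1))).foldl max (pos.getD (i+1) 0)

-- the stack of Source B's backward pass, top first: the chain i, Nsp i, Nsp (Nsp i), … while < length.
def ChainL (price : List Int) (i : Nat) : List Nat :=
  if h : i < price.length then i :: ChainL price (Nsp price i) else []
termination_by price.length - i
decreasing_by have := Nsp_gt price i h; omega

lemma ChainL_stop (price : List Int) (i : Nat) (h : ¬ i < price.length) : ChainL price i = [] := by
  conv_lhs => rw [ChainL]
  rw [dif_neg h]

lemma ChainL_cons (price : List Int) (i : Nat) (h : i < price.length) :
    ChainL price i = i :: ChainL price (Nsp price i) := by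
  conv_lhs => rw [ChainL]
  rw [dif_pos h]

lemma getD_set' {α : Type} (l : List α) (i k : Nat) (a d : α) :
    (l.set i a).getD k d = if i = k ∧ i < l.length then a else l.getD k d := by
  rw [List.getD_eq_getElem?_getD, List.getD_eq_getElem?_getD, List.getElem?_set]
  by_cases h1 : i = k
  · subst h1
    by_cases h2 : i < l.length
    · simp [h2]
    · simp [h2]
  · simp [h1]

lemma foldl_max_exch (l : List Int) (a b : Int) : l.foldl max (max a b) = max a (l.foldl max b) := by
  induction l generalizing b with
  | nil => rfl
  | cons x tl ih => simp only [List.foldl_cons, max_assoc]; exact ih (max b x)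

lemma popB_spec (pos price far : List Int) (hpl : price.length = pos.length) (i : Nat)
    (hfar : ∀ k, i < k → k < price.length → far.getD k 0 = Fsp pos price k) :
    ∀ d j f, price.length - j ≤ d → i < j → j ≤ price.length →
    (∀ k, i < k → k < j → ¬ (price.getD k 0 < price.getD i 0)) →
    popB price far (price.getD i 0) (ChainL price j) f
      = (ChainL price (Nsp price i), ((pos.drop j).take (Nsp price i - j)).foldl max f) := by
  intro d
  induction d with
  | zero =>
    intro j f h0 h1 h2 h4
    have hj : j = price.length := by omega
    have hNeq : Nsp price i = j := Nsp_eq price i j h1 h2 h4 (fun hlt => by omega)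
    rw [hj, ChainL_stop price price.length (by omega)]
    simp [popB, hNeq, hj, ChainL_stop price price.length (by omega)]
  | succ dd ih =>
    intro j f h0 h1 h2 h4
    by_cases hjl : j < price.length
    · rw [ChainL_cons price j hjl]
      simp only [popB]
      by_cases hpj : price.getD i 0 ≤ price.getD j 0
      · rw [if_pos hpj]
        have hj'_gt : j < Nsp price j := Nsp_gt price j hjl
        have hj'_le : Nsp price j ≤ price.length := Nsp_le price j
        have hmin' : ∀ k, i < k → k < Nsp price j → ¬ (price.getD k 0 < price.getD i 0) := by
          intro k hik hkj'
          rcases lt_trichotomy k j with hk | rfl | hk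
          · exact h4 k hik hk
          · omega
          · have := Nsp_not_cheap price j k hk hkj'
            omega
        -- j < Nsp price i and Nsp price j ≤ Nsp price i
        have hNgt : i < Nsp price i := Nsp_gt price i (by omega)
        have hNle : Nsp price i ≤ price.length := Nsp_le price i
        have hNj : j < Nsp price i := by
          rcases Nat.lt_or_ge j (Nsp price i) with h | h
          · exact h
          · exfalso
            rcases Nat.eq_or_lt_of_le h with heq | hlt
            · have := Nsp_cheap price i (by omega)
              rw [heq] at this; omega
            · exact h4 (Nsp price i) hNgt hlt (Nsp_cheap price i (by omega))
        have hj'N : Nsp price j ≤ Nsp price i := by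
          by_contra hgt
          rcases Nat.lt_or_ge (Nsp price i) price.length with hNl | hNl
          · exact Nsp_not_cheap price j (Nsp price i) hNj (by omega) (by have := Nsp_cheap price i hNl; omega)
          · omega
        rw [hfar j h1 hjl, ih (Nsp price j) (max f (Fsp pos price j)) (by omega) (by omega) hj'_le hmin']
        have hsplit : (pos.drop j).take (Nsp price i - j)
            = (pos.drop j).take (Nsp price j - j) ++ (pos.drop (Nsp price j)).take (Nsp price i - Nsp price j) := by
          rw [show Nsp price i - j = (Nsp price j - j) + (Nsp price i - Nsp price j) by omega,
            List.take_add, List.drop_drop, show j + (Nsp price j - j) = Nsp price j by omega]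
        have hjpos : j < pos.length := by omega
        have hseg1 : (pos.drop j).take (Nsp price j - j)
            = pos.getD j 0 :: (pos.drop (j+1)).take (Nsp price j - (j+1)) := by
          conv_lhs => rw [show Nsp price j - j = (Nsp price j - (j+1)) + 1 by omega,
            List.drop_eq_getElem_cons hjpos]
          rw [List.take_succ_cons, ← List.getD_eq_getElem pos 0 hjpos]
        rw [hsplit, List.foldl_append, hseg1, List.foldl_cons]
        congr 1
        rw [show Fsp pos price j = List.foldl max (pos.getD j 0)
              (List.take (Nsp price j - (j+1)) (List.drop (j+1) pos)) from rfl,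
          foldl_max_exch (List.take (Nsp price j - (j + 1)) (List.drop (j + 1) pos)) f (pos.getD j 0),
          foldl_max_exch (List.take (Nsp price i - Nsp price j) (List.drop (Nsp price j) pos)) f
            (List.foldl max (pos.getD j 0) (List.take (Nsp price j - (j + 1)) (List.drop (j + 1) pos)))]
      · rw [if_neg hpj]
        have hNeq : Nsp price i = j := Nsp_eq price i j h1 h2 h4 (fun _ => by omega)
        rw [hNeq, ChainL_cons price j hjl]
        simp
    · have hj : j = price.length := by omega
      have hNeq : Nsp price i = j := Nsp_eq price i j h1 h2 h4 (fun hlt => by omega)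
      rw [hj, ChainL_stop price price.length (by omega)]
      simp [popB, hNeq, hj, ChainL_stop price price.length (by omega)]

lemma buildB_spec (pos price : List Int) (hpl : price.length = pos.length) :
    ∀ c (nxt : List Nat) (far : List Int) (stk : List Nat), c ≤ price.length →
    nxt.length = price.length → far.length = price.length →
    stk = ChainL price c →
    (∀ k, c ≤ k → k < price.length →
      nxt.getD k 0 = Nsp price k ∧ far.getD k 0 = Fsp pos price k) →
    (∀ k, k < c → nxt.getD k 0 = price.length ∧ far.getD k 0 = pos.getD k 0) →
    ∀ k, k < price.length →
      (buildB price c nxt far stk).1.getD k 0 = Nsp price k ∧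
      (buildB price c nxt far stk).2.getD k 0 = Fsp pos price k := by
  intro c
  induction c with
  | zero =>
    intro nxt far stk hc hn hm hstk hG hL k hk
    simpa [buildB] using hG k (Nat.zero_le k) hk
  | succ c ihc =>
    intro nxt far stk hc hn hm hstk hG hL k hk
    simp only [buildB]
    have hcl : c < price.length := by omega
    have hfc : far.getD c 0 = pos.getD c 0 := (hL c (by omega)).2
    have hpop := popB_spec pos price far hpl c
      (fun k' h1 h2 => (hG k' (by omega) h2).2)
      price.length (c+1) (pos.getD c 0) (by omega) (by omega) (by omega)
      (by intro k' a b c; omega)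
    have hNc_gt : c < Nsp price c := Nsp_gt price c hcl
    have hNc_le : Nsp price c ≤ price.length := Nsp_le price c
    have hFc : ((pos.drop (c+1)).take (Nsp price c - (c+1))).foldl max (pos.getD c 0)
        = Fsp pos price c := rfl
    rw [hstk, hfc, hpop, hFc]
    have hnxt' : (match ChainL price (Nsp price c) with
        | [] => nxt
        | s :: _ => nxt.set c s).getD c 0 = Nsp price c ∧
        ∀ k', k' ≠ c → (match ChainL price (Nsp price c) with
        | [] => nxt
        | s :: _ => nxt.set c s).getD k' 0 = nxt.getD k' 0 := by
      by_cases hNl : Nsp price c < price.length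
      · rw [ChainL_cons price (Nsp price c) hNl]
        refine ⟨?_, ?_⟩
        · rw [getD_set']; simp [hn, hcl]
        · intro k' hk'; rw [getD_set', if_neg (by omega)]
      · have : Nsp price c = price.length := by omega
        rw [ChainL_stop price (Nsp price c) (by omega)]
        exact ⟨by rw [(hL c (by omega)).1, this], fun k' _ => rfl⟩
    apply ihc _ _ _ (by omega)
      (by cases hh : ChainL price (Nsp price c) <;> simp [hn])
      (by simp [hm])
      (by simp [ChainL_cons price c hcl])
      ?_ ?_ k hk
    · intro k' hk1 hk2
      rcases Nat.eq_or_lt_of_le hk1 with rfl | hlt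
      · exact ⟨hnxt'.1, by rw [getD_set']; simp [hm, hcl]⟩
      · obtain ⟨g1, g2⟩ := hG k' (by omega) hk2
        refine ⟨?_, ?_⟩
        · rw [hnxt'.2 k' (by omega)]; exact g1
        · rw [getD_set', if_neg (by omega)]; exact g2
    · intro k' hk'
      obtain ⟨g1, g2⟩ := hL k' (by omega)
      refine ⟨?_, ?_⟩
      · rw [hnxt'.2 k' (by omega)]; exact g1
      · rw [getD_set', if_neg (by omega)]; exact g2

lemma zip_map_snd_take (S P : List Int) (h : S.length ≤ P.length) :
    (S.zip P).map Prod.snd = P.take S.length := by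
  induction S generalizing P with
  | nil => simp
  | cons x tl ih =>
    cases P with
    | nil => simp at h
    | cons y tlP => simpa using ih tlP (by simpa using h)

lemma scanA_eq (rest : List (Int × Int)) (j i : Nat) (pi ci L : Int) :
    scanA rest j pi ci L i =
      match rest.findIdx? (fun x => decide (x.2 < ci)) with
      | none => i
      | some k => if (rest.take (k+1)).all (fun x => decide (x.1 ≤ pi + L)) then j + k else i := by
  induction rest generalizing j with
  | nil => rfl
  | cons hd tl ih =>
    obtain ⟨p, c⟩ := hd
    rw [List.findIdx?_cons]
    by_cases hc : c < ci
    · simp only [scanA, hc, decide_true, if_true]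
      by_cases hp : p > pi + L
      · simp only [if_pos hp]
        simp [List.all_cons, show ¬ (p ≤ pi + L) by omega]
      · simp only [if_neg hp]
        simp [List.all_cons, show p ≤ pi + L by omega]
    · simp only [scanA, hc, decide_false, if_false]
      by_cases hp : p > pi + L
      · simp only [if_pos hp]
        cases hf : tl.findIdx? (fun x => decide (x.2 < ci)) with
        | none => simp
        | some k => simp [show ¬ (p ≤ pi + L) by omega]
      · simp only [if_neg hp, show ¬ (c < ci) from hc, if_false]
        rw [ih (j+1)]
        cases hf : tl.findIdx? (fun x => decide (x.2 < ci)) with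
        | none => simp
        | some k =>
          simp only [Option.map_some, Bool.false_eq_true, if_false, List.take_succ_cons, List.all_cons,
            show decide (p ≤ pi + L) = true by simp; omega, Bool.true_and]
          by_cases hall : (tl.take (k+1)).all (fun x => decide (x.1 ≤ pi + L)) = true
          · simp [hall]; omega
          · simp [hall]

lemma foldl_max_le_iff (l : List Int) (c B : Int) :
    l.foldl max c ≤ B ↔ c ≤ B ∧ ∀ x ∈ l, x ≤ B := by
  induction l generalizing c with
  | nil => simp
  | cons x tl ih =>
    simp only [List.foldl_cons, ih, max_le_iff, List.mem_cons]
    constructor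
    · rintro ⟨⟨h1, h2⟩, h3⟩; exact ⟨h1, fun y hy => by rcases hy with rfl | hy; exact h2; exact h3 y hy⟩
    · rintro ⟨h1, h2⟩; exact ⟨⟨h1, h2 x (Or.inl rfl)⟩, fun y hy => h2 y (Or.inr hy)⟩

lemma getD_fst (sts : List (Int × Int)) (k : Nat) :
    (sts.map Prod.fst).getD k 0 = (sts.getD k (0,0)).1 :=
  List.getD_map sts ((0:Int),(0:Int)) Prod.fst

lemma getD_snd (sts : List (Int × Int)) (k : Nat) :
    (sts.map Prod.snd).getD k 0 = (sts.getD k (0,0)).2 :=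
  List.getD_map sts ((0:Int),(0:Int)) Prod.snd

lemma scan_spec (sts : List (Int × Int)) (L : Int) (i : Nat) (hi : i < sts.length) :
    scanA (sts.drop i) i ((sts.getD i (0,0)).1) ((sts.getD i (0,0)).2) L i
      = if 0 ≤ L ∧ Nsp (sts.map Prod.snd) i < sts.length ∧
            Msp (sts.map Prod.fst) (sts.map Prod.snd) i ≤ (sts.getD i (0,0)).1 + L
        then Nsp (sts.map Prod.snd) i else i := by
  rw [scanA_eq]
  have hdrop : sts.drop i = sts.getD i (0,0) :: sts.drop (i+1) := by
    rw [List.getD_eq_getElem _ _ hi]; exact List.drop_eq_getElem_cons hi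
  rw [hdrop, List.findIdx?_cons]
  simp only [lt_self_iff_false, decide_false, Bool.false_eq_true, if_false]
  have hfind : (sts.drop (i+1)).findIdx? (fun x => decide (x.2 < (sts.getD i (0,0)).2))
      = ((sts.map Prod.snd).drop (i+1)).findIdx? (fun c => decide (c < (sts.map Prod.snd).getD i 0)) := by
    rw [← List.map_drop, List.findIdx?_map]
    simp only [getD_snd, Function.comp_def]
  cases hf : ((sts.map Prod.snd).drop (i+1)).findIdx? (fun c => decide (c < (sts.map Prod.snd).getD i 0)) with
  | none =>
    rw [hfind, hf]
    have hN : Nsp (sts.map Prod.snd) i = sts.length := by simp only [Nsp, hf]; simp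
    simp [hN]
  | some k =>
    rw [hfind, hf]
    have hN : Nsp (sts.map Prod.snd) i = i + 1 + k := by simp only [Nsp, hf]
    have hk := (List.findIdx?_eq_some_iff_getElem.mp hf).1
    simp only [List.length_drop, List.length_map] at hk
    have hNlt : Nsp (sts.map Prod.snd) i < sts.length := by omega
    simp only [Option.map_some]
    rw [List.take_succ_cons, List.all_cons]
    have hhead : decide ((sts.getD i (0,0)).1 ≤ (sts.getD i (0,0)).1 + L) = decide (0 ≤ L) := by
      by_cases h : 0 ≤ L <;> simp [h] <;> omega
    rw [hhead]
    have hi1 : i + 1 < sts.length := by omega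
    have hcons : ((sts.map Prod.fst).drop (i+1)).take (k+1)
        = (sts.map Prod.fst).getD (i+1) 0 :: ((sts.map Prod.fst).drop (i+2)).take k := by
      conv_lhs => rw [List.drop_eq_getElem_cons (by simpa using hi1)]
      rw [List.take_succ_cons, ← List.getD_eq_getElem (sts.map Prod.fst) 0 (by simpa using hi1)]
    have hrest : ((sts.drop (i+1)).take (k+1)).all (fun x => decide (x.1 ≤ (sts.getD i (0,0)).1 + L))
        = decide (Msp (sts.map Prod.fst) (sts.map Prod.snd) i ≤ (sts.getD i (0,0)).1 + L) := by
      have hmap : ((sts.drop (i+1)).take (k+1)).all (fun x => decide (x.1 ≤ (sts.getD i (0,0)).1 + L))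
          = (((sts.map Prod.fst).drop (i+1)).take (k+1)).all (fun p => decide (p ≤ (sts.getD i (0,0)).1 + L)) := by
        rw [← List.map_drop, ← List.map_take, List.all_map]
        rfl
      rw [hmap, hcons, List.all_cons]
      unfold Msp
      rw [hN, show i + 1 + k - (i+1) = k by omega]
      by_cases hM : (((sts.map Prod.fst).drop (i+2)).take k).foldl max ((sts.map Prod.fst).getD (i+1) 0) ≤ (sts.getD i (0,0)).1 + L
      · rw [decide_eq_true hM]
        rw [foldl_max_le_iff] at hM
        simp only [Bool.and_eq_true, decide_eq_true_eq, List.all_eq_true]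
        exact ⟨hM.1, fun x hx => hM.2 x hx⟩
      · rw [decide_eq_false hM]
        rw [foldl_max_le_iff] at hM
        rw [Classical.not_and_iff_not_or_not] at hM
        rcases hM with h1 | h2
        · simp only [Bool.and_eq_false_iff]
          exact Or.inl (by simpa using h1)
        · rw [not_forall] at h2
          obtain ⟨x, hx⟩ := h2
          rw [Classical.not_imp] at hx
          simp only [Bool.and_eq_false_iff, List.all_eq_false]
          exact Or.inr ⟨x, hx.1, by simpa using hx.2⟩
    rw [hrest, hN]
    by_cases hL : 0 ≤ L
    · by_cases hM : Msp (sts.map Prod.fst) (sts.map Prod.snd) i ≤ (sts.getD i (0,0)).1 + L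
      · rw [decide_eq_true hL, decide_eq_true hM, Bool.and_self, if_pos rfl,
          if_pos (show 0 ≤ L ∧ i + 1 + k < sts.length ∧
            Msp (sts.map Prod.fst) (sts.map Prod.snd) i ≤ (sts.getD i (0,0)).1 + L from
            ⟨hL, by omega, hM⟩)]
        omega
      · rw [decide_eq_false hM, Bool.and_false,
          if_neg (show ¬((false : Bool) = true) by simp),
          if_neg (show ¬(0 ≤ L ∧ i + 1 + k < sts.length ∧
            Msp (sts.map Prod.fst) (sts.map Prod.snd) i ≤ (sts.getD i (0,0)).1 + L) from
            fun h => hM h.2.2)]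
    · rw [decide_eq_false hL, Bool.false_and,
        if_neg (show ¬((false : Bool) = true) by simp),
        if_neg (show ¬(0 ≤ L ∧ i + 1 + k < sts.length ∧
          Msp (sts.map Prod.fst) (sts.map Prod.snd) i ≤ (sts.getD i (0,0)).1 + L) from
          fun h => hL h.1)]

-- bridge between A's condition (0 ≤ L ∧ Msp ≤ …) and B's (max Fsp (pos Nsp) ≤ …):
-- both say that every position from i through Nsp i lies within pos i + L.
lemma max_Fsp_eq (pos price : List Int) (i : Nat) (hpl : price.length = pos.length)
    (hi : i < pos.length) (hN : Nsp price i < pos.length) :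
    max (Fsp pos price i) (pos.getD (Nsp price i) 0) = max (pos.getD i 0) (Msp pos price i) := by
  have hgt : i < Nsp price i := Nsp_gt price i (by omega)
  have hseg : (pos.drop (i+1)).take (Nsp price i - i)
      = (pos.drop (i+1)).take (Nsp price i - (i+1)) ++ [pos.getD (Nsp price i) 0] := by
    have hr : Nsp price i - (i+1) < (pos.drop (i+1)).length := by simp; omega
    rw [show Nsp price i - i = (Nsp price i - (i+1)) + 1 by omega, List.take_add_one,
      List.getElem?_eq_getElem hr]
    simp only [Option.toList_some]
    congr 2
    rw [← List.getD_eq_getElem (pos.drop (i+1)) 0 hr, getD_drop']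
    congr 1; omega
  have hseg2 : (pos.drop (i+1)).take (Nsp price i - i)
      = pos.getD (i+1) 0 :: (pos.drop (i+2)).take (Nsp price i - (i+1)) := by
    have hi1lt : i + 1 < pos.length := by omega
    conv_lhs => rw [show Nsp price i - i = (Nsp price i - (i+1)) + 1 by omega,
      List.drop_eq_getElem_cons hi1lt]
    rw [List.take_succ_cons, ← List.getD_eq_getElem pos 0 hi1lt]
  have h1 : ((pos.drop (i+1)).take (Nsp price i - i)).foldl max (pos.getD i 0)
      = max (Fsp pos price i) (pos.getD (Nsp price i) 0) := by
    rw [hseg, List.foldl_append]; rfl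
  have h2 : ((pos.drop (i+1)).take (Nsp price i - i)).foldl max (pos.getD i 0)
      = max (pos.getD i 0) (Msp pos price i) := by
    rw [hseg2, List.foldl_cons, foldl_max_exch]; rfl
  rw [← h1, h2]

theorem main_eq (S P : List Int) (L t : Int) (hPre : S.length ≤ P.length) :
    tankb1 S P L t = tankb1_alt S P L t := by
  simp only [tankb1, tankb1_alt]
  set sts : List (Int × Int) := (0, 0) :: (S.zip P ++ [(t, 0)]) with hsts
  set pos : List Int := 0 :: S ++ [t] with hposdef
  set price : List Int := 0 :: P.take S.length ++ [0] with hpricedef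
  have hpos : pos = sts.map Prod.fst := by
    simp [hposdef, hsts, List.map_fst_zip hPre]
  have hprice : price = sts.map Prod.snd := by
    simp [hpricedef, hsts, zip_map_snd_take S P hPre]
  have hslen : sts.length = S.length + 2 := by
    simp [hsts, Nat.min_eq_left hPre]
  have hplen : pos.length = S.length + 2 := by simp [hposdef]
  have hprlen : price.length = pos.length := by
    simp [hpricedef, hposdef, Nat.min_eq_left hPre]
  have hP : ∀ k, pos.getD k 0 = (sts.getD k (0,0)).1 := fun k => by
    rw [hpos]; exact getD_fst sts k
  have hC : ∀ k, price.getD k 0 = (sts.getD k (0,0)).2 := fun k => by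
    rw [hprice]; exact getD_snd sts k
  have hGood : ∀ k, k < pos.length →
      (buildB price pos.length (List.replicate pos.length pos.length) pos []).1.getD k 0 = Nsp price k ∧
      (buildB price pos.length (List.replicate pos.length pos.length) pos []).2.getD k 0 = Fsp pos price k := by
    have := buildB_spec pos price hprlen pos.length
      (List.replicate pos.length pos.length) pos []
      (by omega) (by rw [hprlen]; simp) hprlen.symm
      ((ChainL_stop price pos.length (by omega)).symm)
      (fun k h1 h2 => by omega)
      (fun k hk => ⟨by rw [List.getD_replicate _ (by omega), hprlen], rfl⟩)
    exact fun k hk => this k (by omega)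
  rw [show S.length + 2 - 1 = pos.length - 1 by omega]
  refine congrArg Prod.snd (PySem.List.foldl_congr_mem _ _ _ _ ?_)
  intro acc i hi
  rw [List.mem_range] at hi
  obtain ⟨hg1, hg2⟩ := hGood i (by omega)
  rw [scan_spec sts L i (by omega), hg1, hg2, ← hpos, ← hprice,
    show sts.length = pos.length by omega]
  simp only [← hP, ← hC]
  have hiF := max_Fsp_eq pos price i hprlen (by omega)
  by_cases hcond : Nsp price i < pos.length ∧ max (Fsp pos price i) (pos.getD (Nsp price i) 0) ≤ pos.getD i 0 + L
  · have hA : 0 ≤ L ∧ Nsp price i < pos.length ∧ Msp pos price i ≤ pos.getD i 0 + L := by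
      have := hiF hcond.1
      rw [this] at hcond
      have hm := hcond.2
      rw [max_le_iff] at hm
      exact ⟨by omega, hcond.1, hm.2⟩
    rw [if_pos hA, if_pos hcond,
      if_neg (show ¬(Nsp price i = i) by
        have := Nsp_gt price i (by omega); omega)]
  · have hA : ¬(0 ≤ L ∧ Nsp price i < pos.length ∧ Msp pos price i ≤ pos.getD i 0 + L) := by
      intro h
      apply hcond
      refine ⟨h.2.1, ?_⟩
      rw [hiF h.2.1, max_le_iff]
      exact ⟨by omega, h.2.2⟩
    rw [if_neg hA, if_pos rfl, if_neg hcond]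

-- ===== VERDICT (by name: the statement is the Claim_ definition above) =====
theorem tankb1_spec : Claim_equal_tankb1 := by
  intro S P L t hDom hPre
  unfold Spec_tankb1
  exact main_eq S P L t hPre
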